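-- pv_equiv track=rewrite | github.com/tansexe/ConnectK | bots/22052342_bot.py | evaluate_connectivity
-- ===== SOURCE A (Python) =====
-- def evaluate_connectivity(board, player_id, opponent_id):
--     """Evaluate how well pieces are connected (clustering bonus)"""
--     rows = len(board)
--     cols = len(board[0])
--     score = 0
--
--     directions = [(0, 1), (1, 0), (1, 1), (1, -1)]
--
--     for r in range(rows):
--         for c in range(cols):
--             if board[r][c] == player_id:
--                 # Count adjacent friendly pieces
--                 adjacent_count = 0
--                 for dr, dc in directions:
--                     nr, nc = r + dr, c + dc
--                     if 0 <= nr < rows and 0 <= nc < cols and board[nr][nc] == player_id: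
--                         adjacent_count += 1
--
--                 # Bonus for connected pieces
--                 score += adjacent_count * 2
--
--             elif board[r][c] == opponent_id:
--                 # Penalize opponent's connectivity
--                 adjacent_count = 0
--                 for dr, dc in directions:
--                     nr, nc = r + dr, c + dc
--                     if 0 <= nr < rows and 0 <= nc < cols and board[nr][nc] == opponent_id:
--                         adjacent_count += 1
--
--                 score -= adjacent_count * 2
--
--     return score
-- ===== SOURCE B (Python) =====
-- def evaluate_connectivity(board, player_id, opponent_id):
--     """Same score via adjacent PAIRS: each of the 4 forward directions visits
--     every adjacent pair once; a same-valued pair contributes +2 (player) or -2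
--     (opponent, checked after player).  Implemented with zips, no index math."""
--     cols = len(board[0])
--
--     def pair(a, b):
--         if a != b:
--             return 0
--         if a == player_id:
--             return 2
--         if a == opponent_id:
--             return -2
--         return 0
--
--     score = 0
--     for row in board:
--         row = row[:cols]
--         score += sum(pair(a, b) for a, b in zip(row, row[1:]))
--     for up, down in zip(board, board[1:]):
--         up, down = up[:cols], down[:cols]
--         score += sum(pair(a, b) for a, b in zip(up, down))        # vertical
--         score += sum(pair(a, b) for a, b in zip(up, down[1:]))    # diagonal (1, 1)
--         score += sum(pair(a, b) for a, b in zip(up[1:], down))    # diagonal (1, -1)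
--     return score
-- ===== Notes on version B (the rewrite author's own statement) =====
-- stated objective: alternative
-- what changed: Instead of per-cell branching with an inner 4-direction neighbour-counting loop, B sums over adjacent PAIRS directly: zips of each row with its tail (horizontal) and of consecutive rows (vertical and both diagonals), scoring each equal-valued pair +2/-2 with no index arithmetic or bounds checks.
import Mathlib
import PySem

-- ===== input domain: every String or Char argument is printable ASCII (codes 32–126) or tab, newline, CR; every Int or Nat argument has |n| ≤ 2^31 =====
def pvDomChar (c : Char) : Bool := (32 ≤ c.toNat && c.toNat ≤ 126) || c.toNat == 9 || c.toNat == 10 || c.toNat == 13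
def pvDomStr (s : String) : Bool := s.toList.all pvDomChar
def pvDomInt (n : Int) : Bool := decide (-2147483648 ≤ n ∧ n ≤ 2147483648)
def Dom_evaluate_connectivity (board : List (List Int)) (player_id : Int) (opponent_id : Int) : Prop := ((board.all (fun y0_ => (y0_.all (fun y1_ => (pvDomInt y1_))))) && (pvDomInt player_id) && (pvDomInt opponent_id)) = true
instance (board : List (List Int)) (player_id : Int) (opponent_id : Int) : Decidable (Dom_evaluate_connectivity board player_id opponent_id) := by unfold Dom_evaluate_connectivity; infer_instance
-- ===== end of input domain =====

-- B rescores the board by summing over adjacent PAIRS via zips (each forward direction visits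
-- every pair once), instead of A's per-cell branch with an inner 4-direction neighbour count;
-- same cost, no index arithmetic.


-- ===== PORT A =====
-- literal port of A; board[0] (raises on empty board) and board[r][c] are pyGetD under
-- Pre_evaluate_connectivity, which excludes exactly the raising inputs
def evaluate_connectivity (board : List (List Int)) (player_id : Int) (opponent_id : Int) : Int :=
  let rows : Int := PySem.List.len board
  let cols : Int := PySem.List.len (PySem.List.pyGetD board 0 [])
  let directions : List (Int × Int) := [(0, 1), (1, 0), (1, 1), (1, -1)]
  (PySem.List.pyRange 0 rows 1).foldl (fun score r =>
    (PySem.List.pyRange 0 cols 1).foldl (fun score c =>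
      if PySem.List.pyGetD (PySem.List.pyGetD board r []) c 0 = player_id then
        let adjacent_count : Int := directions.foldl (fun adj d =>
          let nr := r + d.1
          let nc := c + d.2
          if 0 ≤ nr ∧ nr < rows ∧ 0 ≤ nc ∧ nc < cols ∧
              PySem.List.pyGetD (PySem.List.pyGetD board nr []) nc 0 = player_id then
            adj + 1
          else adj) 0
        score + adjacent_count * 2
      else if PySem.List.pyGetD (PySem.List.pyGetD board r []) c 0 = opponent_id then
        let adjacent_count : Int := directions.foldl (fun adj d =>
          let nr := r + d.1
          let nc := c + d.2
          if 0 ≤ nr ∧ nr < rows ∧ 0 ≤ nc ∧ nc < cols ∧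
              PySem.List.pyGetD (PySem.List.pyGetD board nr []) nc 0 = opponent_id then
            adj + 1
          else adj) 0
        score - adjacent_count * 2
      else score) score) 0

-- ===== PORT B =====
-- pair(a, b) of Source B
def pvPair (player_id opponent_id a b : Int) : Int :=
  if a ≠ b then 0
  else if a = player_id then 2
  else if a = opponent_id then -2
  else 0

def evaluate_connectivity_alt (board : List (List Int)) (player_id : Int) (opponent_id : Int) : Int :=
  let cols : Nat := (PySem.List.pyGetD board 0 []).length   -- len(board[0]); raises on [] like A
  let horiz : Int := board.foldl (fun score row =>
    let row := row.take cols
    score + ((row.zip row.tail).map (fun ab => pvPair player_id opponent_id ab.1 ab.2)).sum) 0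
  let vert : Int := (board.zip board.tail).foldl (fun score ud =>
    let up := ud.1.take cols
    let down := ud.2.take cols
    score
      + ((up.zip down).map (fun ab => pvPair player_id opponent_id ab.1 ab.2)).sum
      + ((up.zip down.tail).map (fun ab => pvPair player_id opponent_id ab.1 ab.2)).sum
      + ((up.tail.zip down).map (fun ab => pvPair player_id opponent_id ab.1 ab.2)).sum) 0
  horiz + vert

-- ===== PRECONDITION & SPEC =====
-- Pre_ excludes exactly the inputs where A raises IndexError: the empty board (board[0]),
-- and boards where some row is shorter than row 0 (board[r][c] for c < len(board[0])).
def Pre_evaluate_connectivity (board : List (List Int)) (player_id : Int) (opponent_id : Int) : Prop :=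
  board ≠ [] ∧ ∀ row ∈ board, (board.getD 0 []).length ≤ row.length
instance (board : List (List Int)) (player_id : Int) (opponent_id : Int) : Decidable (Pre_evaluate_connectivity board player_id opponent_id) := by unfold Pre_evaluate_connectivity; infer_instance

def pvWitness_evaluate_connectivity : List (List Int) × Int × Int := ([[1, 2], [2, 1]], 1, 2)

def Spec_evaluate_connectivity (board : List (List Int)) (player_id : Int) (opponent_id : Int) (out : Int) : Prop := out = evaluate_connectivity_alt board player_id opponent_id
instance (board : List (List Int)) (player_id : Int) (opponent_id : Int) (out : Int) : Decidable (Spec_evaluate_connectivity board player_id opponent_id out) := by unfold Spec_evaluate_connectivity; infer_instance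

-- ===== CLAIM (what is proved, stated in full; the proofs are below) =====
def Claim_equal_evaluate_connectivity : Prop := ∀ (board : List (List Int)) (player_id : Int) (opponent_id : Int), Dom_evaluate_connectivity board player_id opponent_id → Pre_evaluate_connectivity board player_id opponent_id → Spec_evaluate_connectivity board player_id opponent_id (evaluate_connectivity board player_id opponent_id)

-- ===== LEMMAS AND PROOFS =====

-- the cell at (r, c), 0 outside; both reductions below land on sums over this function
def pvCell (board : List (List Int)) (r c : Nat) : Int := (board.getD r []).getD c 0

-- the common normal form: sum over cells and the four forward directions of the pair score
def pvRef (board : List (List Int)) (p o : Int) (R C : Nat) : Int :=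
  ∑ r ∈ Finset.range R, ∑ c ∈ Finset.range C,
    ((if c + 1 < C then pvPair p o (pvCell board r c) (pvCell board r (c + 1)) else 0)
     + (if r + 1 < R then pvPair p o (pvCell board r c) (pvCell board (r + 1) c) else 0)
     + (if r + 1 < R ∧ c + 1 < C then pvPair p o (pvCell board r c) (pvCell board (r + 1) (c + 1)) else 0)
     + (if r + 1 < R ∧ 1 ≤ c then pvPair p o (pvCell board r c) (pvCell board (r + 1) (c - 1)) else 0))

theorem pv_sum_shift_lt (n : Nat) (f : Nat → Int) :
    ∑ c ∈ Finset.range n, (if c + 1 < n then f c else 0) = ∑ c ∈ Finset.range (n - 1), f c := by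
  cases n with
  | zero => simp
  | succ m =>
    rw [Finset.sum_range_succ]
    simp only [Nat.add_sub_cancel]
    rw [Finset.sum_congr rfl (fun c hc => if_pos (by simp at hc; omega))]
    simp

theorem pv_sum_shift_ge (n : Nat) (f : Nat → Int) :
    ∑ c ∈ Finset.range n, (if 1 ≤ c then f c else 0) = ∑ c ∈ Finset.range (n - 1), f (c + 1) := by
  cases n with
  | zero => simp
  | succ m => rw [Finset.sum_range_succ']; simp

theorem pv_ref_regroup (board : List (List Int)) (p o : Int) (R C : Nat) :
    pvRef board p o R C
      = (∑ r ∈ Finset.range R, ∑ c ∈ Finset.range (C - 1),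
            pvPair p o (pvCell board r c) (pvCell board r (c + 1)))
        + ∑ r ∈ Finset.range (R - 1),
            ((∑ c ∈ Finset.range C, pvPair p o (pvCell board r c) (pvCell board (r + 1) c))
             + (∑ c ∈ Finset.range (C - 1), pvPair p o (pvCell board r c) (pvCell board (r + 1) (c + 1)))
             + (∑ c ∈ Finset.range (C - 1), pvPair p o (pvCell board r (c + 1)) (pvCell board (r + 1) c))) := by
  unfold pvRef
  have step : ∀ r,
      (∑ c ∈ Finset.range C,
        ((if c + 1 < C then pvPair p o (pvCell board r c) (pvCell board r (c + 1)) else 0)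
         + (if r + 1 < R then pvPair p o (pvCell board r c) (pvCell board (r + 1) c) else 0)
         + (if r + 1 < R ∧ c + 1 < C then pvPair p o (pvCell board r c) (pvCell board (r + 1) (c + 1)) else 0)
         + (if r + 1 < R ∧ 1 ≤ c then pvPair p o (pvCell board r c) (pvCell board (r + 1) (c - 1)) else 0)))
      = (∑ c ∈ Finset.range (C - 1), pvPair p o (pvCell board r c) (pvCell board r (c + 1)))
        + (if r + 1 < R then (∑ c ∈ Finset.range C, pvPair p o (pvCell board r c) (pvCell board (r + 1) c)) else 0)
        + (if r + 1 < R then (∑ c ∈ Finset.range (C - 1), pvPair p o (pvCell board r c) (pvCell board (r + 1) (c + 1))) else 0)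
        + (if r + 1 < R then (∑ c ∈ Finset.range (C - 1), pvPair p o (pvCell board r (c + 1)) (pvCell board (r + 1) c)) else 0) := by
    intro r
    rw [Finset.sum_add_distrib, Finset.sum_add_distrib, Finset.sum_add_distrib]
    congr 1
    · congr 1
      · congr 1
        · exact pv_sum_shift_lt C _
        · by_cases h : r + 1 < R <;> simp [h]
      · simp only [ite_and]
        by_cases h : r + 1 < R
        · simp only [if_pos h]; exact pv_sum_shift_lt C _
        · simp [h]
    · simp only [ite_and]
      by_cases h : r + 1 < R
      · simp only [if_pos h]
        rw [pv_sum_shift_ge C (fun c => pvPair p o (pvCell board r c) (pvCell board (r + 1) (c - 1)))]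
        simp
      · simp [h]
  rw [Finset.sum_congr rfl (fun r _ => step r)]
  rw [Finset.sum_add_distrib, Finset.sum_add_distrib, Finset.sum_add_distrib]
  rw [pv_sum_shift_lt R _, pv_sum_shift_lt R _, pv_sum_shift_lt R _, Finset.sum_add_distrib, Finset.sum_add_distrib]
  ring

theorem pv_zip_sum {α β : Type} (G : α → β → Int) (d1 : α) (d2 : β) :
    ∀ (u : List α) (v : List β),
      ((u.zip v).map (fun ab => G ab.1 ab.2)).sum
        = ∑ c ∈ Finset.range (min u.length v.length), G (u.getD c d1) (v.getD c d2) := by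
  intro u
  induction u with
  | nil => intro v; simp
  | cons x u ih =>
    intro v
    cases v with
    | nil => simp
    | cons y v =>
      simp only [List.zip_cons_cons, List.map_cons, List.sum_cons, ih v, List.length_cons]
      rw [Nat.succ_min_succ, Finset.sum_range_succ']
      simp [List.getD]; ring

theorem pv_map_sum_getD {α : Type} (f : α → Int) (d : α) :
    ∀ (l : List α), (l.map f).sum = ∑ r ∈ Finset.range l.length, f (l.getD r d) := by
  intro l
  induction l with
  | nil => simp
  | cons x l ih =>
    simp only [List.map_cons, List.sum_cons, ih, List.length_cons]
    rw [Finset.sum_range_succ']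
    simp [List.getD, add_comm]

theorem pv_getD_tail {α : Type} (l : List α) (n : Nat) (d : α) :
    l.tail.getD n d = l.getD (n + 1) d := by
  cases l <;> simp [List.getD]

theorem pv_getD_take {α : Type} (l : List α) (n c : Nat) (d : α) (h : c < n) :
    (l.take n).getD c d = l.getD c d := by
  simp [List.getD, h]

theorem pv_zip_getD {α β : Type} (u : List α) (v : List β) (r : Nat) (d1 : α) (d2 : β)
    (h1 : r < u.length) (h2 : r < v.length) :
    (u.zip v).getD r (d1, d2) = (u.getD r d1, v.getD r d2) := by
  rw [List.getD_eq_getElem _ _ (by simp [List.length_zip]; omega),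
      List.getD_eq_getElem _ _ h1, List.getD_eq_getElem _ _ h2, List.getElem_zip]

theorem pv_foldl_add3 {β : Type} (l : List β) (f g h : β → Int) (a : Int) :
    l.foldl (fun s x => s + f x + g x + h x) a = a + (l.map (fun x => f x + g x + h x)).sum := by
  rw [show (fun (s : Int) x => s + f x + g x + h x) = (fun s x => s + (f x + g x + h x)) from
    funext fun s => funext fun x => by ring]
  exact PySem.List.foldl_add l _ a

theorem pv_foldl_branch {β : Type} (l : List β) (P Q : β → Prop) [DecidablePred P] [DecidablePred Q]
    (f g : β → Int) (a : Int) :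
    l.foldl (fun s x => if P x then s + f x else if Q x then s - g x else s) a
      = a + (l.map (fun x => if P x then f x else if Q x then -(g x) else 0)).sum := by
  rw [show (fun (s : Int) x => if P x then s + f x else if Q x then s - g x else s)
        = (fun s x => s + (if P x then f x else if Q x then -(g x) else 0)) from
      funext fun s => funext fun x => by split_ifs <;> ring]
  exact PySem.List.foldl_add l _ a

theorem pv_count_step (G : Prop) [Decidable G] (t : Int) :
    (if G then t + 1 else t) = t + (if G then 1 else 0) := by split_ifs <;> ring

theorem pv_left_p (p o a x : Int) (h : a = p) : pvPair p o a x = if x = p then 2 else 0 := by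
  subst h; unfold pvPair; split_ifs <;> simp_all

theorem pv_left_o (p o a x : Int) (hp : ¬ a = p) (ho : a = o) :
    pvPair p o a x = if x = o then -2 else 0 := by
  subst ho; unfold pvPair; split_ifs <;> simp_all

theorem pv_left_none (p o a x : Int) (hp : ¬ a = p) (ho : ¬ a = o) : pvPair p o a x = 0 := by
  unfold pvPair; split_ifs <;> simp_all

theorem pv_sum_range (n : Nat) (f : Nat → Int) :
    ((List.range n).map f).sum = ∑ i ∈ Finset.range n, f i := rfl

theorem pv_cell_abs (p o a n1 n2 n3 n4 : Int)
    (P1 P2 P3 P4 O1 O2 O3 O4 Q1 Q2 Q3 Q4 : Prop)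
    [Decidable P1] [Decidable P2] [Decidable P3] [Decidable P4]
    [Decidable O1] [Decidable O2] [Decidable O3] [Decidable O4]
    [Decidable Q1] [Decidable Q2] [Decidable Q3] [Decidable Q4]
    (hP1 : P1 ↔ (Q1 ∧ n1 = p)) (hP2 : P2 ↔ (Q2 ∧ n2 = p))
    (hP3 : P3 ↔ (Q3 ∧ n3 = p)) (hP4 : P4 ↔ (Q4 ∧ n4 = p))
    (hO1 : O1 ↔ (Q1 ∧ n1 = o)) (hO2 : O2 ↔ (Q2 ∧ n2 = o))
    (hO3 : O3 ↔ (Q3 ∧ n3 = o)) (hO4 : O4 ↔ (Q4 ∧ n4 = o)) :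
    (if a = p then
      (0 + (if P1 then (1:Int) else 0) + (if P2 then (1:Int) else 0)
         + (if P3 then (1:Int) else 0) + (if P4 then (1:Int) else 0)) * 2
     else if a = o then
      -((0 + (if O1 then (1:Int) else 0) + (if O2 then (1:Int) else 0)
          + (if O3 then (1:Int) else 0) + (if O4 then (1:Int) else 0)) * 2)
     else 0)
    = (if Q1 then pvPair p o a n1 else 0) + (if Q2 then pvPair p o a n2 else 0)
      + (if Q3 then pvPair p o a n3 else 0) + (if Q4 then pvPair p o a n4 else 0) := by
  by_cases hp1 : a = p
  · simp only [if_pos hp1, pv_left_p p o _ _ hp1]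
    have d1 : (if P1 then (1:Int) else 0) * 2 = (if Q1 then (if n1 = p then 2 else 0) else 0) := by
      by_cases hQ : Q1 <;> by_cases he : n1 = p <;> norm_num [hP1, hQ, he]
    have d2 : (if P2 then (1:Int) else 0) * 2 = (if Q2 then (if n2 = p then 2 else 0) else 0) := by
      by_cases hQ : Q2 <;> by_cases he : n2 = p <;> norm_num [hP2, hQ, he]
    have d3 : (if P3 then (1:Int) else 0) * 2 = (if Q3 then (if n3 = p then 2 else 0) else 0) := by
      by_cases hQ : Q3 <;> by_cases he : n3 = p <;> norm_num [hP3, hQ, he]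
    have d4 : (if P4 then (1:Int) else 0) * 2 = (if Q4 then (if n4 = p then 2 else 0) else 0) := by
      by_cases hQ : Q4 <;> by_cases he : n4 = p <;> norm_num [hP4, hQ, he]
    linear_combination d1 + d2 + d3 + d4
  · simp only [if_neg hp1]
    by_cases ho1 : a = o
    · simp only [if_pos ho1, pv_left_o p o _ _ hp1 ho1]
      have d1 : (if O1 then (1:Int) else 0) * 2 = -(if Q1 then (if n1 = o then -2 else 0) else 0) := by
        by_cases hQ : Q1 <;> by_cases he : n1 = o <;> norm_num [hO1, hQ, he]
      have d2 : (if O2 then (1:Int) else 0) * 2 = -(if Q2 then (if n2 = o then -2 else 0) else 0) := by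
        by_cases hQ : Q2 <;> by_cases he : n2 = o <;> norm_num [hO2, hQ, he]
      have d3 : (if O3 then (1:Int) else 0) * 2 = -(if Q3 then (if n3 = o then -2 else 0) else 0) := by
        by_cases hQ : Q3 <;> by_cases he : n3 = o <;> norm_num [hO3, hQ, he]
      have d4 : (if O4 then (1:Int) else 0) * 2 = -(if Q4 then (if n4 = o then -2 else 0) else 0) := by
        by_cases hQ : Q4 <;> by_cases he : n4 = o <;> norm_num [hO4, hQ, he]
      linear_combination -d1 - d2 - d3 - d4
    · simp only [if_neg ho1, pv_left_none p o _ _ hp1 ho1]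
      simp

set_option maxHeartbeats 2000000 in
theorem pvA_eq (board : List (List Int)) (p o : Int) :
    evaluate_connectivity board p o = pvRef board p o board.length (board.getD 0 []).length := by
  unfold evaluate_connectivity
  simp only [PySem.List.len_eq, PySem.List.pyGetD_zero]
  simp only [pv_foldl_branch]
  rw [PySem.List.foldl_add]
  simp only [PySem.List.pyRange_zero_nat, List.map_map]
  rw [pv_sum_range, zero_add]
  unfold pvRef
  refine Finset.sum_congr rfl fun r hr => ?_
  rw [Finset.mem_range] at hr
  simp only [Function.comp_apply]
  rw [pv_sum_range]
  refine Finset.sum_congr rfl fun c hc => ?_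
  rw [Finset.mem_range] at hc
  simp only [List.foldl_cons, List.foldl_nil, pv_count_step]
  simp only [Function.comp_apply, add_zero]
  rw [show ((r : Int) + 1) = (((r + 1 : Nat) : Int)) from by push_cast; ring,
      show ((c : Int) + 1) = (((c + 1 : Nat) : Int)) from by push_cast; ring]
  simp only [PySem.List.pyGetD_natCast, pvCell]
  by_cases hc1 : 1 ≤ c
  · rw [show ((c : Int) + -1) = (((c - 1 : Nat) : Int)) from by
      rw [Nat.cast_sub hc1]; ring]
    simp only [PySem.List.pyGetD_natCast]
    apply pv_cell_abs <;> omega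
  · apply pv_cell_abs <;> omega

theorem pvB_eq (board : List (List Int)) (p o : Int)
    (hpre : ∀ row ∈ board, (board.getD 0 []).length ≤ row.length) :
    evaluate_connectivity_alt board p o
      = (∑ r ∈ Finset.range board.length, ∑ c ∈ Finset.range ((board.getD 0 []).length - 1),
            pvPair p o (pvCell board r c) (pvCell board r (c + 1)))
        + ∑ r ∈ Finset.range (board.length - 1),
            ((∑ c ∈ Finset.range (board.getD 0 []).length, pvPair p o (pvCell board r c) (pvCell board (r + 1) c))
             + (∑ c ∈ Finset.range ((board.getD 0 []).length - 1), pvPair p o (pvCell board r c) (pvCell board (r + 1) (c + 1)))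
             + (∑ c ∈ Finset.range ((board.getD 0 []).length - 1), pvPair p o (pvCell board r (c + 1)) (pvCell board (r + 1) c))) := by
  have hlen : ∀ r : Nat, r < board.length →
      ((board.getD r []).take (board.getD 0 []).length).length = (board.getD 0 []).length := by
    intro r hr
    have hmem : board.getD r [] ∈ board := by
      rw [List.getD_eq_getElem board [] hr]; exact List.getElem_mem hr
    have h2 := hpre _ hmem
    simp only [List.getD] at h2 ⊢
    simp [List.length_take]
    omega
  -- main reduction
  unfold evaluate_connectivity_alt
  simp only [PySem.List.pyGetD_zero]
  rw [PySem.List.foldl_add, pv_foldl_add3]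
  rw [pv_map_sum_getD _ ([] : List Int), pv_map_sum_getD _ (([], []) : List Int × List Int)]
  have hR1 : (board.zip board.tail).length = board.length - 1 := by
    simp [List.length_zip, List.length_tail]
  rw [hR1, zero_add, zero_add]
  congr 1
  · -- horizontal part
    refine Finset.sum_congr rfl fun r hr => ?_
    rw [Finset.mem_range] at hr
    rw [pv_zip_sum (pvPair p o) 0 0]
    have hu := hlen r hr
    simp only [List.length_tail, hu]
    rw [show min (board.getD 0 []).length ((board.getD 0 []).length - 1)
          = (board.getD 0 []).length - 1 from by omega]
    refine Finset.sum_congr rfl fun c hc => ?_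
    rw [Finset.mem_range] at hc
    rw [pv_getD_tail, pv_getD_take _ _ _ _ (by omega), pv_getD_take _ _ _ _ (by omega)]
    rfl
  · -- vertical and diagonal part
    refine Finset.sum_congr rfl fun r hr => ?_
    rw [Finset.mem_range] at hr
    have hz : (board.zip board.tail).getD r ([], []) = (board.getD r [], board.getD (r + 1) []) := by
      rw [pv_zip_getD _ _ _ _ _ (by omega) (by simp [List.length_tail]; omega), pv_getD_tail]
    rw [hz]
    have hu := hlen r (by omega)
    have hd := hlen (r + 1) (by omega)
    rw [pv_zip_sum (pvPair p o) 0 0, pv_zip_sum (pvPair p o) 0 0, pv_zip_sum (pvPair p o) 0 0]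
    simp only [List.length_tail, hu, hd]
    rw [min_self,
        show min (board.getD 0 []).length ((board.getD 0 []).length - 1)
          = (board.getD 0 []).length - 1 from by omega,
        show min ((board.getD 0 []).length - 1) (board.getD 0 []).length
          = (board.getD 0 []).length - 1 from by omega]
    congr 1
    · congr 1
      · refine Finset.sum_congr rfl fun c hc => ?_
        rw [Finset.mem_range] at hc
        rw [pv_getD_take _ _ _ _ (by omega), pv_getD_take _ _ _ _ (by omega)]
        rfl
      · refine Finset.sum_congr rfl fun c hc => ?_
        rw [Finset.mem_range] at hc
        rw [pv_getD_tail, pv_getD_take _ _ _ _ (by omega), pv_getD_take _ _ _ _ (by omega)]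
        rfl
    · refine Finset.sum_congr rfl fun c hc => ?_
      rw [Finset.mem_range] at hc
      rw [pv_getD_tail, pv_getD_take _ _ _ _ (by omega), pv_getD_take _ _ _ _ (by omega)]
      rfl

-- ===== VERDICT (by name: the statement is the Claim_ definition above) =====
theorem evaluate_connectivity_spec : Claim_equal_evaluate_connectivity := by
  intro board p o _ hpre
  unfold Spec_evaluate_connectivity
  rw [pvA_eq, pvB_eq board p o hpre.2, pv_ref_regroup]
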